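-- pv_equiv track=rewrite | github.com/GottiPaolo/pyLattice | pyLattice/pyLattice.py | component_wise
-- ===== SOURCE A (Python) =====
-- def component_wise(d1,d2):
--     """
--     funzione di confronto compoennt wise
--     """
--     one_win = False
--     for a,b in zip(d1,d2):
--         if b<a:
--             return False
--         elif b>a:
--             one_win = True
--     return one_win
-- ===== SOURCE B (Python) =====
-- def component_wise(d1, d2):
--     pairs = list(zip(d1, d2))
--     return all(b >= a for a, b in pairs) and any(b > a for a, b in pairs)
-- ===== Notes on version B (the rewrite author's own statement) =====
-- stated objective: idiomatic
-- what changed: Replaces A's single fused loop carrying a one_win flag by two separate quantifier passes over the zipped pairs: all(b >= a) and any(b > a).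
import Mathlib
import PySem

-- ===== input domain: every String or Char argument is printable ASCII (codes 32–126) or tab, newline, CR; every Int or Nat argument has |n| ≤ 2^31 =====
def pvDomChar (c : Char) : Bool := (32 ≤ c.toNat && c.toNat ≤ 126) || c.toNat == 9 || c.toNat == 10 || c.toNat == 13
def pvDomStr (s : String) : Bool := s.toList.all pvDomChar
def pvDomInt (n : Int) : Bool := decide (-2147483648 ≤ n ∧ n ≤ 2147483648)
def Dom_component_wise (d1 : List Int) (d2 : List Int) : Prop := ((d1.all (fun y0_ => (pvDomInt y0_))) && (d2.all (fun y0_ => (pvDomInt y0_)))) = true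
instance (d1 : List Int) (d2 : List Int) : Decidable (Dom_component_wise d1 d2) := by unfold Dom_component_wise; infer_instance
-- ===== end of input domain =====

-- B replaces A's fused flag-carrying loop with two separate quantifier passes (all/any) over the zipped pairs; objective: idiomatic.


-- ===== PORT A =====
-- literal port of A's loop: iterate over zip, early-return false on b < a, set one_win on b > a
def component_wise_loop (pairs : List (Int × Int)) (one_win : Bool) : Bool :=
  match pairs with
  | [] => one_win
  | (a, b) :: rest =>
    if b < a then false
    else if b > a then component_wise_loop rest true
    else component_wise_loop rest one_win

def component_wise (d1 : List Int) (d2 : List Int) : Bool :=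
  component_wise_loop (List.zip d1 d2) false

-- ===== PORT B =====
def component_wise_alt (d1 : List Int) (d2 : List Int) : Bool :=
  let pairs := List.zip d1 d2
  (pairs.all (fun p => p.2 ≥ p.1)) && (pairs.any (fun p => p.2 > p.1))

-- ===== PRECONDITION & SPEC =====
def Spec_component_wise (d1 : List Int) (d2 : List Int) (out : Bool) : Prop := out = component_wise_alt d1 d2
instance (d1 : List Int) (d2 : List Int) (out : Bool) : Decidable (Spec_component_wise d1 d2 out) := by unfold Spec_component_wise; infer_instance

-- ===== CLAIM (what is proved, stated in full; the proofs are below) =====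
def Claim_equal_component_wise : Prop := ∀ (d1 : List Int) (d2 : List Int), Dom_component_wise d1 d2 → Spec_component_wise d1 d2 (component_wise d1 d2)

-- ===== LEMMAS AND PROOFS =====
theorem component_wise_loop_eq (pairs : List (Int × Int)) (one_win : Bool) :
    component_wise_loop pairs one_win
      = ((pairs.all (fun p => p.2 ≥ p.1)) && (one_win || pairs.any (fun p => p.2 > p.1))) := by
  induction pairs generalizing one_win with
  | nil => simp [component_wise_loop]
  | cons hd tl ih =>
    obtain ⟨a, b⟩ := hd
    simp only [component_wise_loop, List.all_cons, List.any_cons]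
    split_ifs with h1 h2
    · simp [decide_eq_false (by omega : ¬ b ≥ a)]
    · rw [ih]
      simp [decide_eq_true (by omega : b ≥ a), decide_eq_true h2]
    · rw [ih]
      simp [decide_eq_true (by omega : b ≥ a), decide_eq_false h2]

-- ===== VERDICT (by name: the statement is the Claim_ definition above) =====
theorem component_wise_spec : Claim_equal_component_wise := by
  intro d1 d2 _
  unfold Spec_component_wise component_wise component_wise_alt
  rw [component_wise_loop_eq]
  simp
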